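-- pv_equiv track=rewrite | github.com/cyraxjoe/pypfop | examples/simple_table/simple_table.py | get_lorem_rows
-- ===== SOURCE A (Python) =====
-- lorem = """Lorem ipsum dolor sit amet, consectetur adipiscing elit. Bonum appello quicquid secundurn naturam est, quod contra malum, nec ego solus, sed tu etiam, Chrysippe, in foro, domi; Nam libero tempore, cum soluta nobis est eligendi optio, cumque nihil impedit, quo minus id, quod maxime placeat, facere possimus, omnis voluptas assumenda est, omnis dolor repellendus. Qualis est igitur omnis haec, quam dico, conspiratio consensusque virtutum, tale est illud ipsum honestum, quandoquidem honestum aut ipsa virtus est aut res gesta virtute; Ut enim, inquit, gubernator aeque peccat, si palearum navem evertit et si auri, item aeque peccat, qui parentem et qui servum iniuria verberat. Non elogia monimentorum id significant, velut hoc ad portam: Hunc unum plurimae consentiunt gentes populi primarium fuisse virum. Duo Reges: constructio interrete. Cumque ipsa virtus efficiat ita beatam vitam, ut beatior esse non possit, tamen quaedam deesse sapientibus tum, cum sint beatissimi; Nos beatam vitam non depulsione mali, sed adeptione boni iudicemus, nec eam cessando, sive gaudentem, ut Aristippus, sive non dolentem, ut hic, sed agendo aliquid considerandove quaeramus. Unum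 est sine dolore esse, alterum cum voluptate. Gracchum patrem non beatiorem fuisse quam fillum, cum alter stabilire rem publicam studuerit, alter evertere. Censemus autem facillime te id explanare posse, quod et Staseam Neapolitanum multos annos habueris apud te et complures iam menses Athenis haec ipsa te ex Antiocho videamus exquirere."""
--
-- def get_lorem_rows(cols=4, words=3):
--     hugelorem = lorem * 10
--     def get_cells():
--         elem = []
--         for i, word in enumerate(hugelorem.split(), 1):
--             elem.append(word)
--             if not i % words:
--                 yield ' '.join(elem)
--                 elem = []
--     def get_rows():
--         cells = []
--         for i, cell in enumerate(get_cells(), 1):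
--             cells.append(cell)
--             if not i % cols:
--                 yield cells
--                 cells = []
--     return get_rows()
-- ===== SOURCE B (Python) =====
-- lorem = """Lorem ipsum dolor sit amet, consectetur adipiscing elit. Bonum appello quicquid secundurn naturam est, quod contra malum, nec ego solus, sed tu etiam, Chrysippe, in foro, domi; Nam libero tempore, cum soluta nobis est eligendi optio, cumque nihil impedit, quo minus id, quod maxime placeat, facere possimus, omnis voluptas assumenda est, omnis dolor repellendus. Qualis est igitur omnis haec, quam dico, conspiratio consensusque virtutum, tale est illud ipsum honestum, quandoquidem honestum aut ipsa virtus est aut res gesta virtute; Ut enim, inquit, gubernator aeque peccat, si palearum navem evertit et si auri, item aeque peccat, qui parentem et qui servum iniuria verberat. Non elogia monimentorum id significant, velut hoc ad portam: Hunc unum plurimae consentiunt gentes populi primarium fuisse virum. Duo Reges: constructio interrete. Cumque ipsa virtus efficiat ita beatam vitam, ut beatior esse non possit, tamen quaedam deesse sapientibus tum, cum sint beatissimi; Nos beatam vitam non depulsione mali, sed adeptione boni iudicemus, nec eam cessando, sive gaudentem, ut Aristippus, sive non dolentem, ut hic, sed agendo aliquid considerandove quaeramus. Unum est sine dolore esse,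 alterum cum voluptate. Gracchum patrem non beatiorem fuisse quam fillum, cum alter stabilire rem publicam studuerit, alter evertere. Censemus autem facillime te id explanare posse, quod et Staseam Neapolitanum multos annos habueris apud te et complures iam menses Athenis haec ipsa te ex Antiocho videamus exquirere."""
--
--
-- def get_lorem_rows(cols=4, words=3):
--     # Eager chunking by index arithmetic: there are len(toks)//words complete
--     # cells, cell i being the slice of `words` tokens starting at i*words;
--     # the cell list is cut into len(cells)//cols complete rows the same way.
--     # Trailing partial cells/rows are dropped by the floor division.
--     def rows():
--         toks = (lorem * 10).split()
--         cells = [' '.join(toks[i * words:(i + 1) * words])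
--                  for i in range(len(toks) // words)]
--         for r in range(len(cells) // cols):
--             yield cells[r * cols:(r + 1) * cols]
--     return rows()
-- ===== Notes on version B (the rewrite author's own statement) =====
-- stated objective: alternative
-- what changed: Replaces A's two nested lazy generators, each a running accumulator flushed on a counter-modulo test, by eager index arithmetic (len(toks)//words complete cells built by slicing, then len(cells)//cols complete rows by slicing); Pre_ keeps the natural domain cols>=1 and words>=1, excluding zero counts (where consuming A's generator raises ZeroDivisionError, except the corner cols=0 with words>2211 where A happens to yield []) and negative counts, where A's negative-modulus flushing is an accident outside the task's natural domain.
-- outside the precondition, e.g. on get_lorem_rows(0, 3000): A returns [], B raises ZeroDivisionError; on get_lorem_rows(-2, 2211): A returns [], B returns []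
import Mathlib
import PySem

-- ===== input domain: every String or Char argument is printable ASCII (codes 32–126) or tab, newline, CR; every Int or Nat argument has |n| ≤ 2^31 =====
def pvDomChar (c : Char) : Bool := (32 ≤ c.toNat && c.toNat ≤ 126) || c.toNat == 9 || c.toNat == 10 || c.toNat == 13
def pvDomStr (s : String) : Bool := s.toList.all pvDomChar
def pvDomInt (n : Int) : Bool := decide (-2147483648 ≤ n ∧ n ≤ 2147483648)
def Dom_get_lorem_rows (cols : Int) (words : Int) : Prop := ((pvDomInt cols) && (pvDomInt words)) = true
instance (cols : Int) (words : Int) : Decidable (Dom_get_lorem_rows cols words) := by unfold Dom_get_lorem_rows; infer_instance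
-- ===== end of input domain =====

-- B replaces A's two lazy generators (running accumulators flushed on a modulo test) by eager
-- slicing into complete chunks; the equivalence is about the materialised sequence of rows
-- (A returns a lazy generator object, B's generator is eager over precomputed lists).

-- module-level constant 'lorem' shared by both Pythons
def pvLorem : String := "Lorem ipsum dolor sit amet, consectetur adipiscing elit. Bonum appello quicquid secundurn naturam est, quod contra malum, nec ego solus, sed tu etiam, Chrysippe, in foro, domi; Nam libero tempore, cum soluta nobis est eligendi optio, cumque nihil impedit, quo minus id, quod maxime placeat, facere possimus, omnis voluptas assumenda est, omnis dolor repellendus. Qualis est igitur omnis haec, quam dico, conspiratio consensusque virtutum, tale est illud ipsum honestum, quandoquidem honestum aut ipsa virtus est aut res gesta virtute; Ut enim, inquit, gubernator aeque peccat, si palearum navem evertit et si auri, item aeque peccat, qui parentem et qui servum iniuria verberat. Non elogia monimentorum id significant, velut hoc ad portam: Hunc unum plurimae consentiunt gentes populi primarium fuisse virum. Duo Reges: constructio interrete. Cumque ipsa virtus efficiat ita beatam vitam, ut beatior esse non possit, tamen quaedam deesse sapientibus tum, cum sint beatissimi; Nos beatam vitam non depulsione mali, sed adeptione boni iudicemus,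 nec eam cessando, sive gaudentem, ut Aristippus, sive non dolentem, ut hic, sed agendo aliquid considerandove quaeramus. Unum est sine dolore esse, alterum cum voluptate. Gracchum patrem non beatiorem fuisse quam fillum, cum alter stabilire rem publicam studuerit, alter evertere. Censemus autem facillime te id explanare posse, quod et Staseam Neapolitanum multos annos habueris apud te et complures iam menses Athenis haec ipsa te ex Antiocho videamus exquirere."

-- ===== PORT A =====
-- 'for i, word in enumerate(hugelorem.split(), 1): elem.append(word); if not i % words: yield ...'
-- (a word is appended to elem first, then the flush test runs; the trailing partial elem is
-- dropped.  The accumulator is held reversed — cons instead of Python's O(1) append, reversed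
-- back at each flush — so the port evaluates in linear time; the flushed list is exactly A's 'elem')
def pvGetCellsLoop (words : Int) : List String → Int → List String → List String
  | [], _, _ => []
  | wd :: rest, i, elem =>
    if PySem.Int.mod i words == 0 then
      PySem.Str.join " " (wd :: elem).reverse :: pvGetCellsLoop words rest (i + 1) []
    else
      pvGetCellsLoop words rest (i + 1) (wd :: elem)

-- 'for i, cell in enumerate(get_cells(), 1): cells.append(cell); if not i % cols: yield cells'
-- (same reversed-accumulator representation as above)
def pvGetRowsLoop (cols : Int) : List String → Int → List String → List (List String)
  | [], _, _ => []
  | cl :: rest, i, cells =>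
    if PySem.Int.mod i cols == 0 then
      (cl :: cells).reverse :: pvGetRowsLoop cols rest (i + 1) []
    else
      pvGetRowsLoop cols rest (i + 1) (cl :: cells)

def get_lorem_rows (cols : Int) (words : Int) : List (List String) :=
  let hugelorem := PySem.Str.join "" (List.replicate 10 pvLorem)  -- lorem * 10
  pvGetRowsLoop cols (pvGetCellsLoop words (PySem.Str.split₀ hugelorem) 1 []) 1 []

-- ===== PORT B =====
def get_lorem_rows_alt (cols : Int) (words : Int) : List (List String) :=
  let toks := PySem.Str.split₀ (PySem.Str.join "" (List.replicate 10 pvLorem))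
  let cells := (PySem.List.pyRange 0 (PySem.Int.floordiv (toks.length : Int) words) 1).map
    (fun i => PySem.Str.join " " (PySem.List.slice toks (some (i * words)) (some ((i + 1) * words))))
  (PySem.List.pyRange 0 (PySem.Int.floordiv (cells.length : Int) cols) 1).map
    (fun r => PySem.List.slice cells (some (r * cols)) (some ((r + 1) * cols)))

-- ===== PRECONDITION & SPEC =====
-- Pre_ is the task's natural domain: at least one column per row and one word per cell.
-- It excludes zero counts, where consuming A's generator raises ZeroDivisionError (except the
-- degenerate corner cols = 0 with words > 2211, where A happens to yield no cell and return []
-- while B's floor division raises), and negative counts, outside the natural domain, where A's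
-- flushing via a negative modulus is an accident of 'i % words'.
def Pre_get_lorem_rows (cols : Int) (words : Int) : Prop := 1 ≤ cols ∧ 1 ≤ words
instance (cols : Int) (words : Int) : Decidable (Pre_get_lorem_rows cols words) := by
  unfold Pre_get_lorem_rows; infer_instance
def pvWitness_get_lorem_rows : Int × Int := (4, 3)

def Spec_get_lorem_rows (cols : Int) (words : Int) (out : List (List String)) : Prop :=
  out = get_lorem_rows_alt cols words
instance (cols : Int) (words : Int) (out : List (List String)) :
    Decidable (Spec_get_lorem_rows cols words out) := by
  unfold Spec_get_lorem_rows; infer_instance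

-- ===== CLAIM (what is proved, stated in full; the proofs are below) =====
def Claim_equal_get_lorem_rows : Prop := ∀ (cols : Int) (words : Int),
  Dom_get_lorem_rows cols words → Pre_get_lorem_rows cols words →
  Spec_get_lorem_rows cols words (get_lorem_rows cols words)

-- ===== LEMMAS AND PROOFS =====

-- common normal form: cut xs into its ⌊|xs|/m⌋ complete chunks of m and map f over them
def pvChunks {α β : Type} (f : List α → β) (m : Nat) (xs : List α) : List β :=
  (List.range (xs.length / m)).map (fun i => f ((xs.drop (i * m)).take m))

-- flush-on-full-accumulator form: the length-driven essence of A's counter/modulo loops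
def pvFlush {α β : Type} (f : List α → β) (m : Nat) : List α → List α → List β
  | [], _ => []
  | x :: rest, elem =>
    if (elem ++ [x]).length = m then f (elem ++ [x]) :: pvFlush f m rest []
    else pvFlush f m rest (elem ++ [x])

lemma pvFlush_char {α β : Type} (f : List α → β) (m : Nat) :
    ∀ (xs : List α) (elem : List α), elem.length < m →
      pvFlush f m xs elem =
        if xs.length < m - elem.length then []
        else f (elem ++ xs.take (m - elem.length)) :: pvFlush f m (xs.drop (m - elem.length)) [] := by
  intro xs
  induction xs with
  | nil =>
    intro elem h
    rw [if_pos (by simp; omega)]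
    rfl
  | cons x rest ih =>
    intro elem h
    by_cases he : (elem ++ [x]).length = m
    · have hm1 : m - elem.length = 1 := by simp at he; omega
      rw [if_neg (by simp [hm1])]
      simp only [pvFlush, if_pos he, hm1]
      simp
    · have hlt : (elem ++ [x]).length < m := by simp at he ⊢; omega
      simp only [pvFlush, if_neg he]
      rw [ih (elem ++ [x]) hlt]
      have hd : m - elem.length = (m - (elem ++ [x]).length) + 1 := by simp; simp at hlt; omega
      rw [hd]
      simp only [List.length_cons, List.take_succ_cons, List.drop_succ_cons]
      split_ifs with h1 h2 h3
      · rfl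
      · exfalso; simp at h1 h2; omega
      · exfalso; simp at h1 h3; omega
      · simp [List.append_assoc]

lemma pvFlush_eq_chunks {α β : Type} (f : List α → β) (m : Nat) (hm : 0 < m) (xs : List α) :
    pvFlush f m xs [] = pvChunks f m xs := by
  suffices H : ∀ (n : Nat) (ys : List α), ys.length ≤ n → pvFlush f m ys [] = pvChunks f m ys from
    H xs.length xs le_rfl
  intro n
  induction n with
  | zero =>
    intro ys hy
    have : ys = [] := List.eq_nil_of_length_eq_zero (by omega)
    subst this
    simp [pvFlush, pvChunks]
  | succ n ih =>
    intro ys hy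
    rw [pvFlush_char f m ys [] hm]
    simp only [List.nil_append, List.length_nil, Nat.sub_zero]
    by_cases hlt : ys.length < m
    · rw [if_pos hlt]
      simp [pvChunks, Nat.div_eq_of_lt hlt]
    · rw [if_neg hlt]
      have hge : m ≤ ys.length := Nat.le_of_not_lt hlt
      rw [ih (ys.drop m) (by simp; omega)]
      unfold pvChunks
      rw [List.length_drop, Nat.div_eq_sub_div hm hge, List.range_succ_eq_map]
      simp only [List.map_cons, List.map_map, Nat.zero_mul, List.drop_zero]
      congr 1
      apply List.map_congr_left
      intro i _
      simp only [Function.comp_apply]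
      rw [List.drop_drop]
      congr 3
      rw [Nat.succ_mul]
      omega

-- the counter invariant: at counter i with accumulator elem, k divides i - 1 - |elem|,
-- so the modulo flush fires exactly when the accumulator reaches |k| elements
lemma pvDvd_iff (k : Int) (_hk : k ≠ 0) (i : Int) (elem : List α) (x : α)
    (hlen : elem.length < k.natAbs) (hdvd : k ∣ (i - 1 - elem.length)) :
    (k ∣ i) ↔ (elem ++ [x]).length = k.natAbs := by
  constructor
  · intro h
    have h2 : k ∣ ((elem.length : Int) + 1) := by
      have e : (elem.length : Int) + 1 = i - (i - 1 - elem.length) := by ring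
      rw [e]
      exact dvd_sub h hdvd
    have h3 : ((k.natAbs : Int)) ∣ ((elem.length : Int) + 1) := by rwa [Int.natAbs_dvd]
    have h4 : (k.natAbs : Int) ≤ (elem.length : Int) + 1 :=
      Int.le_of_dvd (by positivity) h3
    simp only [List.length_append, List.length_singleton]
    omega
  · intro h
    simp only [List.length_append, List.length_singleton] at h
    have h1 : k ∣ ((elem.length : Int) + 1) := by
      rw [← Int.natAbs_dvd]
      have e : ((k.natAbs : Int)) = (elem.length : Int) + 1 := by omega
      rw [e]
    have e : i = (i - 1 - elem.length) + ((elem.length : Int) + 1) := by ring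
    rw [e]
    exact dvd_add hdvd h1

lemma pvCellsLoop_eq_flush (k : Int) (hk : k ≠ 0) :
    ∀ (xs : List String) (i : Int) (elem relem : List String), relem = elem.reverse →
      elem.length < k.natAbs → k ∣ (i - 1 - elem.length) →
      pvGetCellsLoop k xs i relem = pvFlush (PySem.Str.join " ") k.natAbs xs elem := by
  intro xs
  induction xs with
  | nil => intro i elem relem hr _ _; subst hr; rfl
  | cons x rest ih =>
    intro i elem relem hr hlen hdvd
    subst hr
    have hiff := pvDvd_iff k hk i elem x hlen hdvd
    by_cases hc : (elem ++ [x]).length = k.natAbs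
    · have hdvdi : k ∣ i := hiff.mpr hc
      have hm : (PySem.Int.mod i k == 0) = true := by
        simp [PySem.Int.mod_eq_zero_iff_dvd, hdvdi]
      simp only [pvGetCellsLoop, pvFlush, hm, if_pos hc, if_true]
      congr 1
      · simp
      · exact ih (i + 1) [] [] rfl (by simpa using Int.natAbs_pos.mpr hk)
          (by simpa using hdvdi)
    · have hm : (PySem.Int.mod i k == 0) = false := by
        simp [PySem.Int.mod_eq_zero_iff_dvd]
        exact fun hd => hc (hiff.mp hd)
      simp only [pvGetCellsLoop, pvFlush, hm, if_neg hc, if_false, Bool.false_eq_true]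
      apply ih (i + 1) (elem ++ [x]) (x :: elem.reverse) (by simp) (by simp at hc ⊢; omega)
      have e1 : ((elem ++ [x]).length : Int) = (elem.length : Int) + 1 := by simp
      rw [e1]
      have e2 : i + 1 - 1 - ((elem.length : Int) + 1) = i - 1 - elem.length := by ring
      rw [e2]
      exact hdvd

lemma pvRowsLoop_eq_flush (k : Int) (hk : k ≠ 0) :
    ∀ (xs : List String) (i : Int) (cells rcells : List String), rcells = cells.reverse →
      cells.length < k.natAbs → k ∣ (i - 1 - cells.length) →
      pvGetRowsLoop k xs i rcells = pvFlush id k.natAbs xs cells := by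
  intro xs
  induction xs with
  | nil => intro i cells rcells hr _ _; subst hr; rfl
  | cons x rest ih =>
    intro i cells rcells hr hlen hdvd
    subst hr
    have hiff := pvDvd_iff k hk i cells x hlen hdvd
    by_cases hc : (cells ++ [x]).length = k.natAbs
    · have hdvdi : k ∣ i := hiff.mpr hc
      have hm : (PySem.Int.mod i k == 0) = true := by
        simp [PySem.Int.mod_eq_zero_iff_dvd, hdvdi]
      simp only [pvGetRowsLoop, pvFlush, hm, if_pos hc, if_true]
      congr 1
      · simp
      · exact ih (i + 1) [] [] rfl (by simpa using Int.natAbs_pos.mpr hk)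
          (by simpa using hdvdi)
    · have hm : (PySem.Int.mod i k == 0) = false := by
        simp [PySem.Int.mod_eq_zero_iff_dvd]
        exact fun hd => hc (hiff.mp hd)
      simp only [pvGetRowsLoop, pvFlush, hm, if_neg hc, if_false, Bool.false_eq_true]
      apply ih (i + 1) (cells ++ [x]) (x :: cells.reverse) (by simp) (by simp at hc ⊢; omega)
      have e1 : ((cells ++ [x]).length : Int) = (cells.length : Int) + 1 := by simp
      rw [e1]
      have e2 : i + 1 - 1 - ((cells.length : Int) + 1) = i - 1 - cells.length := by ring
      rw [e2]
      exact hdvd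

-- B's range-and-slice comprehension computes the same complete chunks (for positive k)
lemma pvAlt_eq_chunks {α β : Type} (f : List α → β) (k : Int) (hk : 0 < k) (xs : List α) :
    (PySem.List.pyRange 0 (PySem.Int.floordiv (xs.length : Int) k) 1).map
      (fun i => f (PySem.List.slice xs (some (i * k)) (some ((i + 1) * k)))) =
    pvChunks f k.natAbs xs := by
  have habs : k = (k.natAbs : Int) := by omega
  rw [habs, PySem.Int.floordiv_natCast, PySem.List.pyRange_one]
  unfold pvChunks
  simp only [Int.sub_zero, Int.toNat_natCast, List.map_map]
  apply List.map_congr_left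
  intro j _
  simp only [Function.comp_apply]
  have e1 : (0 + (j : Int)) * (k.natAbs : Int) = ((j * k.natAbs : Nat) : Int) := by
    push_cast; ring
  have e2 : (0 + (j : Int) + 1) * (k.natAbs : Int) =
      ((j * k.natAbs : Nat) : Int) + ((k.natAbs : Nat) : Int) := by
    push_cast; ring
  rw [e1, e2, PySem.List.slice_natCast_add]
  simp [Int.natAbs_abs]

lemma pvAlt_eq_chunks_id (k : Int) (hk : 0 < k) (xs : List String) :
    (PySem.List.pyRange 0 (PySem.Int.floordiv (xs.length : Int) k) 1).map
      (fun r => PySem.List.slice xs (some (r * k)) (some ((r + 1) * k))) =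
    pvChunks id k.natAbs xs :=
  pvAlt_eq_chunks id k hk xs

-- ===== VERDICT (by name: the statement is the Claim_ definition above) =====
set_option maxRecDepth 8192 in
theorem get_lorem_rows_spec : Claim_equal_get_lorem_rows := by
  intro cols words _ hpre
  obtain ⟨hc, hw⟩ := hpre
  have hc0 : cols ≠ 0 := by omega
  have hw0 : words ≠ 0 := by omega
  unfold Spec_get_lorem_rows get_lorem_rows get_lorem_rows_alt
  dsimp only
  rw [pvCellsLoop_eq_flush words hw0 _ 1 [] [] rfl
        (by simpa using Int.natAbs_pos.mpr hw0) (by simp),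
      pvRowsLoop_eq_flush cols hc0 _ 1 [] [] rfl
        (by simpa using Int.natAbs_pos.mpr hc0) (by simp),
      pvFlush_eq_chunks _ _ (Int.natAbs_pos.mpr hw0),
      pvFlush_eq_chunks _ _ (Int.natAbs_pos.mpr hc0),
      pvAlt_eq_chunks (PySem.Str.join " ") words (by omega)]
  exact (pvAlt_eq_chunks_id cols (by omega) _).symm
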